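-- pv_equiv track=rewrite | github.com/elifesciences/sciencebeam-trainer-grobid-tools | sciencebeam_trainer_grobid_tools/structured_document/grobid_training_tei.py | _iter_split_lower_to_upper_case
-- ===== SOURCE A (Python) =====
-- from typing import Dict, Iterable, List, Set
--
-- def _iter_split_lower_to_upper_case(text: str) -> List[str]:
--     start = 0
--     for index, c in enumerate(text):
--         if index > 0 and c.isupper() and text[index - 1].islower():
--             yield text[start:index]
--             start = index
--     if start < len(text):
--         yield text[start:]
-- ===== SOURCE B (Python) =====
-- def _iter_split_lower_to_upper_case(text):
--     # Scan the text RIGHT-TO-LEFT, building each segment as a list of characters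
--     # (no slicing, no index arithmetic): close the current segment whenever the
--     # current char is lowercase and the char to its right is uppercase.
--     segments = []
--     seg = []
--     prev = None
--     for c in reversed(text):
--         if prev is not None and c.islower() and prev.isupper():
--             segments.append(seg)
--             seg = []
--         seg.append(c)
--         prev = c
--     if seg:
--         segments.append(seg)
--     for s in reversed(segments):
--         yield ''.join(reversed(s))
-- ===== Notes on version B (the rewrite author's own statement) =====
-- stated objective: alternative
-- what changed: B scans the text right-to-left and builds each segment by accumulating characters into lists (closing a segment at each lower-to-upper pair seen from the right), then emits the collected segments reversed; A scans left-to-right tracking a start index and yields slices.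
import Mathlib
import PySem

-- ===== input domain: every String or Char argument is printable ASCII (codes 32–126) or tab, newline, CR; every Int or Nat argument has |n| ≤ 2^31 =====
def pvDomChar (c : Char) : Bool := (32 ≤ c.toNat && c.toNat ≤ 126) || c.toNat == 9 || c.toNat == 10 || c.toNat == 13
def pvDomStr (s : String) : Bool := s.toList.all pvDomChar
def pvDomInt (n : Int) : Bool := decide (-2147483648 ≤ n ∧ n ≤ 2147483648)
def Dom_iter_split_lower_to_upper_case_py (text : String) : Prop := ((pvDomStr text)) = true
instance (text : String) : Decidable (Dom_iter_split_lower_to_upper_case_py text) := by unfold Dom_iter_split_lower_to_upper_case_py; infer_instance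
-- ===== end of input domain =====

-- B scans the text right-to-left accumulating each segment as a character list
-- (closing a segment at each lower-to-upper pair), instead of A's left-to-right
-- index scan that yields slices; same cost, alternative structure.


-- ===== PORT A =====
-- loop body of A's scan: at (index, c), if index > 0 and c.isupper() and text[index-1].islower(),
-- yield text[start:index] and reset start
def pvStepA (cs : List Char) (st : Int × List String) (ic : Int × Char) : Int × List String :=
  if decide (0 < ic.1) && PySem.Chars.isupper ic.2 &&
     PySem.Chars.islower (PySem.List.pyGetD cs (ic.1 - 1) ' ') then
    (ic.1, st.2 ++ [String.ofList (PySem.List.slice cs (some st.1) (some ic.1))])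
  else st

def iter_split_lower_to_upper_case_py (text : String) : List String :=
  let cs := text.toList
  let res := (PySem.List.enumerate cs 0).foldl (pvStepA cs) ((0 : Int), ([] : List String))
  if res.1 < (cs.length : Int) then
    res.2 ++ [String.ofList (PySem.List.slice cs (some res.1) none)]
  else res.2

-- ===== PORT B =====
-- loop body of Source B's backward scan over reversed(text); state = (segments, seg, prev)
def pvStepB (st : List (List Char) × List Char × Option Char) (c : Char) :
    List (List Char) × List Char × Option Char :=
  let (segments, seg, _prev) := st
  let (segments', seg') :=
    match st.2.2 with
    | some p =>
      if PySem.Chars.islower c && PySem.Chars.isupper p then (segments ++ [seg], ([] : List Char))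
      else (segments, seg)
    | none => (segments, seg)
  (segments', seg' ++ [c], some c)

def iter_split_lower_to_upper_case_py_alt (text : String) : List String :=
  let cs := text.toList
  let st := cs.reverse.foldl pvStepB ([], [], none)
  let segments := if st.2.1 ≠ [] then st.1 ++ [st.2.1] else st.1
  segments.reverse.map (fun s => String.ofList s.reverse)

-- ===== PRECONDITION & SPEC =====
def Spec_iter_split_lower_to_upper_case_py (text : String) (out : List String) : Prop := out = iter_split_lower_to_upper_case_py_alt text
instance (text : String) (out : List String) : Decidable (Spec_iter_split_lower_to_upper_case_py text out) := by unfold Spec_iter_split_lower_to_upper_case_py; infer_instance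

-- ===== CLAIM (what is proved, stated in full; the proofs are below) =====
def Claim_equal_iter_split_lower_to_upper_case_py : Prop := ∀ (text : String), Dom_iter_split_lower_to_upper_case_py text → Spec_iter_split_lower_to_upper_case_py text (iter_split_lower_to_upper_case_py text)

-- ===== LEMMAS AND PROOFS =====

-- canonical specification: split a char list at lower-to-upper boundaries
def pvSplitL : List Char → List (List Char)
  | [] => []
  | [c] => [[c]]
  | c :: p :: rest =>
    if PySem.Chars.islower c && PySem.Chars.isupper p then
      [c] :: pvSplitL (p :: rest)
    else
      match pvSplitL (p :: rest) with
      | [] => [[c]]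
      | s :: ss => (c :: s) :: ss

-- the boundary predicate
def pvP (cs : List Char) (i : Int) : Bool :=
  PySem.Chars.isupper (PySem.List.pyGetD cs i ' ') &&
  PySem.Chars.islower (PySem.List.pyGetD cs (i - 1) ' ')

-- boundary indices from position j onward, as A's scan sees them (with the 0 < i guard)
def pvBnds (cs : List Char) (j : Nat) : List Int :=
  (PySem.List.pyRange (j : Int) (cs.length : Int) 1).filter
    (fun i => decide (0 < i) && pvP cs i)

-- boundary indices from position j onward, without the guard
def pvBnds2 (cs : List Char) (j : Nat) : List Int :=
  (PySem.List.pyRange (j : Int) (cs.length : Int) 1).filter (pvP cs)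

-- string slices between consecutive boundaries (no final piece)
def pvEmit (cs : List Char) : Int → List Int → List String
  | _, [] => []
  | a, b :: rest => String.ofList (PySem.List.slice cs (some a) (some b)) :: pvEmit cs b rest

-- char-list slices between consecutive boundaries, including the final piece
def pvEmitC (cs : List Char) : Int → List Int → List (List Char)
  | a, [] => [PySem.List.slice cs (some a) none]
  | a, b :: rest => PySem.List.slice cs (some a) (some b) :: pvEmitC cs b rest

def pvLast (a : Int) (l : List Int) : Int := l.foldl (fun _ b => b) a

theorem pvLast_cons (a b : Int) (l : List Int) : pvLast a (b :: l) = pvLast b l := rfl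

theorem pvLast_mem_or_eq (a : Int) (l : List Int) : pvLast a l = a ∨ pvLast a l ∈ l := by
  induction l generalizing a with
  | nil => left; rfl
  | cons b rest ih =>
    rw [pvLast_cons]
    rcases ih b with h | h
    · right; rw [h]; exact List.mem_cons_self
    · right; exact List.mem_cons_of_mem _ h

-- A's scan over the suffix starting at j produces exactly the consecutive slices of
-- the boundaries in [j, n), and leaves the last boundary as the running start
theorem pvLemA (cs : List Char) (ds : List Char) (j : Nat) (hds : ds = cs.drop j)
    (start : Int) (out : List String) :
    (PySem.List.enumerate ds (j : Int)).foldl (pvStepA cs) (start, out) =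
      (pvLast start (pvBnds cs j), out ++ pvEmit cs start (pvBnds cs j)) := by
  induction ds generalizing j start out with
  | nil =>
    have hj : cs.length ≤ j := List.drop_eq_nil_iff.mp hds.symm
    have hb : pvBnds cs j = [] := by
      unfold pvBnds
      rw [PySem.List.pyRange_one_eq_nil (by exact_mod_cast hj), List.filter_nil]
    simp [PySem.List.enumerate_nil, hb, pvLast, pvEmit]
  | cons hd tl ih =>
    have hjlt : j < cs.length := by
      by_contra h
      rw [List.drop_eq_nil_of_le (by omega)] at hds; exact absurd hds (by simp)
    have hcons := List.drop_eq_getElem_cons (l := cs) (i := j) hjlt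
    rw [hcons] at hds
    injection hds with hhd htl
    have hgetD : PySem.List.pyGetD cs (j : Int) ' ' = cs[j] := by
      rw [PySem.List.pyGetD_natCast]; exact List.getD_eq_getElem cs ' ' hjlt
    have hbnds : pvBnds cs j =
        (if (decide (0 < (j : Int)) && pvP cs (j : Int)) = true
         then ((j : Int)) :: pvBnds cs (j + 1) else pvBnds cs (j + 1)) := by
      unfold pvBnds
      rw [PySem.List.pyRange_one_cons (by exact_mod_cast hjlt)]
      push_cast
      simp [List.filter_cons]
    have hstep : pvStepA cs (start, out) ((j : Int), hd) =
        (if (decide (0 < (j : Int)) && pvP cs (j : Int)) = true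
         then ((j : Int), out ++ [String.ofList (PySem.List.slice cs (some start) (some (j : Int)))])
         else (start, out)) := by
      unfold pvStepA pvP
      rw [hhd, ← hgetD]
      simp [Bool.and_assoc]
    rw [PySem.List.enumerate_cons, List.foldl_cons]
    have hcast : (j : Int) + 1 = ((j + 1 : Nat) : Int) := by push_cast; ring
    by_cases hc : (decide (0 < (j : Int)) && pvP cs (j : Int)) = true
    · rw [hstep, if_pos hc, hcast, ih (j + 1) htl]
      rw [hbnds, if_pos hc, pvLast_cons]
      simp [pvEmit]
    · rw [hstep, if_neg hc, hcast, ih (j + 1) htl]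
      rw [hbnds, if_neg hc]

-- the guarded boundary list from 0 equals the unguarded one from 1
theorem pvBnds_zero (cs : List Char) : pvBnds cs 0 = pvBnds2 cs 1 := by
  unfold pvBnds pvBnds2
  by_cases h0 : (0 : Int) < (cs.length : Int)
  · rw [show ((0 : Nat) : Int) = (0 : Int) by norm_num,
      PySem.List.pyRange_one_cons h0, List.filter_cons]
    rw [if_neg (by simp)]
    exact List.filter_congr (fun i hi => by
      have h1 : (1 : Int) ≤ i := (PySem.List.mem_pyRange_one.mp hi).1
      simp [show (0 : Int) < i by omega])
  · rw [show ((0 : Nat) : Int) = (0 : Int) by norm_num,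
      PySem.List.pyRange_one_eq_nil (by omega), PySem.List.pyRange_one_eq_nil (by omega)]
    simp

-- pvEmitC = pvEmit plus the final piece, after mapping to strings
theorem pvEmitC_eq (cs : List Char) (a : Int) (bs : List Int) :
    (pvEmitC cs a bs).map String.ofList =
      pvEmit cs a bs ++ [String.ofList (PySem.List.slice cs (some (pvLast a bs)) none)] := by
  induction bs generalizing a with
  | nil => simp [pvEmitC, pvEmit, pvLast]
  | cons b rest ih => simp [pvEmitC, pvEmit, pvLast_cons, ih b]

-- pvSplitL of a nonempty list is nonempty with nonempty head
theorem pvSplitL_ne_nil (c : Char) (rest : List Char) : pvSplitL (c :: rest) ≠ [] := by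
  cases rest with
  | nil => simp [pvSplitL]
  | cons p tl =>
    unfold pvSplitL
    split_ifs
    · simp
    · cases h : pvSplitL (p :: tl) <;> simp

theorem pvSplitL_headI_ne_nil (c : Char) (rest : List Char) :
    (pvSplitL (c :: rest)).headI ≠ [] := by
  cases rest with
  | nil => simp [pvSplitL]
  | cons p tl =>
    unfold pvSplitL
    split_ifs
    · simp
    · cases h : pvSplitL (p :: tl) <;> simp

theorem pvSplitL_pos (c p : Char) (rest : List Char)
    (h : (PySem.Chars.islower c && PySem.Chars.isupper p) = true) :
    pvSplitL (c :: p :: rest) = [c] :: pvSplitL (p :: rest) := by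
  conv_lhs => rw [pvSplitL]
  rw [if_pos h]

theorem pvSplitL_neg (c p : Char) (rest : List Char) (s : List Char) (ss : List (List Char))
    (h : ¬ (PySem.Chars.islower c && PySem.Chars.isupper p) = true)
    (hS : pvSplitL (p :: rest) = s :: ss) :
    pvSplitL (c :: p :: rest) = (c :: s) :: ss := by
  conv_lhs => rw [pvSplitL]
  rw [if_neg h, hS]

-- MAIN LEMMA (A side): the slice table from position j is the canonical split of the suffix
theorem pvMain (cs : List Char) (ds : List Char) (j : Nat) (hds : ds = cs.drop j)
    (hj : j < cs.length) :
    pvEmitC cs (j : Int) (pvBnds2 cs (j + 1)) = pvSplitL ds := by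
  induction ds generalizing j with
  | nil => exact absurd hds.symm (by simp [List.drop_eq_nil_iff]; omega)
  | cons c tl ih =>
    have hcons := List.drop_eq_getElem_cons (l := cs) (i := j) hj
    rw [hcons] at hds
    injection hds with hhd htl
    cases tl with
    | nil =>
      -- suffix is a single char: j + 1 = length, no boundaries, one final slice
      have hlen : j + 1 = cs.length := by
        have := congrArg List.length htl
        simp [List.length_drop] at this
        omega
      have hb : pvBnds2 cs (j + 1) = [] := by
        unfold pvBnds2
        rw [PySem.List.pyRange_one_eq_nil (by exact_mod_cast hlen.ge), List.filter_nil]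
      rw [hb]
      show [PySem.List.slice cs (some ((j : Nat) : Int)) none] = pvSplitL [c]
      rw [PySem.List.slice_from_natCast, hcons, ← htl, hhd]
      rfl
    | cons p tl2 =>
      have hj1 : j + 1 < cs.length := by
        by_contra h
        rw [List.drop_eq_nil_of_le (by omega)] at htl; exact absurd htl.symm (by simp)
      have hp : p = cs[j + 1] := by
        have hd2 := List.drop_eq_getElem_cons (l := cs) (i := j + 1) hj1
        rw [← htl] at hd2
        exact (List.cons.injEq _ _ _ _ ▸ hd2).1
      -- unfold the boundary list one step
      have hcast2 : ((j + 1 : Nat) : Int) + 1 = ((j + 2 : Nat) : Int) := by push_cast; ring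
      have hbnds : pvBnds2 cs (j + 1) =
          (if pvP cs ((j + 1 : Nat) : Int) = true
           then (((j + 1 : Nat) : Int)) :: pvBnds2 cs (j + 2) else pvBnds2 cs (j + 2)) := by
        unfold pvBnds2
        rw [PySem.List.pyRange_one_cons (by exact_mod_cast hj1), List.filter_cons, hcast2]
      -- the boundary test at j+1 is pvSplitL's test on (c, p)
      have hgp : PySem.List.pyGetD cs ((j + 1 : Nat) : Int) ' ' = cs[j + 1] := by
        rw [PySem.List.pyGetD_natCast]; exact List.getD_eq_getElem cs ' ' hj1
      have hgc : PySem.List.pyGetD cs (((j + 1 : Nat) : Int) - 1) ' ' = cs[j] := by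
        rw [show (((j + 1 : Nat) : Int) - 1) = ((j : Nat) : Int) by push_cast; ring,
          PySem.List.pyGetD_natCast]
        exact List.getD_eq_getElem cs ' ' hj
      have htest : pvP cs ((j + 1 : Nat) : Int) =
          (PySem.Chars.islower c && PySem.Chars.isupper p) := by
        unfold pvP
        rw [hgp, hgc, ← hhd, ← hp, Bool.and_comm]
      -- slices starting at j begin with c
      have hdropj : cs.drop j = c :: cs.drop (j + 1) := by
        rw [hcons, ← hhd]
      have hIH := ih (j + 1) htl hj1
      by_cases hcond : (PySem.Chars.islower c && PySem.Chars.isupper p) = true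
      · rw [hbnds, if_pos (htest ▸ hcond)]
        show PySem.List.slice cs (some ((j : Nat) : Int)) (some ((j + 1 : Nat) : Int)) ::
             pvEmitC cs ((j + 1 : Nat) : Int) (pvBnds2 cs ((j + 1) + 1)) = _
        rw [show (j + 1) + 1 = j + 2 from rfl]
        have hslice : PySem.List.slice cs (some ((j : Nat) : Int)) (some ((j + 1 : Nat) : Int))
            = [c] := by
          rw [PySem.List.slice_natCast, hdropj]
          simp
        rw [hslice, pvSplitL_pos c p tl2 hcond, ← hIH, show (j + 1) + 1 = j + 2 from rfl]
      · rw [hbnds, if_neg (by rw [htest]; exact hcond)]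
        obtain ⟨s, ss, hS⟩ : ∃ s ss, pvSplitL (p :: tl2) = s :: ss := by
          cases h : pvSplitL (p :: tl2) with
          | nil => exact absurd h (pvSplitL_ne_nil p tl2)
          | cons s ss => exact ⟨s, ss, rfl⟩
        rw [pvSplitL_neg c p tl2 s ss hcond hS]
        rw [show (j + 1) + 1 = j + 2 from rfl, hS] at hIH
        cases hB : pvBnds2 cs (j + 2) with
        | nil =>
          rw [hB] at hIH
          simp only [pvEmitC] at hIH ⊢
          rw [PySem.List.slice_from_natCast] at hIH ⊢
          obtain ⟨hs1, hs2⟩ := List.cons.injEq _ _ _ _ ▸ hIH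
          rw [hdropj, hs1, ← hs2]
        | cons b brest =>
          rw [hB] at hIH
          simp only [pvEmitC] at hIH ⊢
          obtain ⟨hs1, hs2⟩ := List.cons.injEq _ _ _ _ ▸ hIH
          have hbmem : b ∈ pvBnds2 cs (j + 2) := by rw [hB]; exact List.mem_cons_self
          unfold pvBnds2 at hbmem
          have hbge : ((j + 1 : Nat) : Int) ≤ b := by
            have := (PySem.List.mem_pyRange_one.mp (List.mem_of_mem_filter hbmem)).1
            rw [← hcast2] at this
            omega
          have hslc : PySem.List.slice cs (some ((j : Nat) : Int)) (some b) =
              c :: PySem.List.slice cs (some ((j + 1 : Nat) : Int)) (some b) := by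
            have hb0 : (0 : Int) ≤ b := by
              have : (0 : Int) ≤ ((j + 1 : Nat) : Int) := by positivity
              omega
            have h1 : ((j : Nat) : Int).toNat = j := by omega
            have h2 : ((j + 1 : Nat) : Int).toNat = j + 1 := by omega
            rw [PySem.List.slice_toNat _ (by positivity) hb0,
              PySem.List.slice_toNat _ (by positivity) hb0, h1, h2, hdropj]
            have h3 : b.toNat - j = (b.toNat - (j + 1)) + 1 := by omega
            rw [h3, List.take_succ_cons]
          rw [hslc, hs1, ← hs2]

-- B's backward fold computes the canonical split (head segment reversed, rest reversed)
theorem pvFoldB (c : Char) (rest : List Char) :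
    (c :: rest).reverse.foldl pvStepB ([], [], none) =
      (((pvSplitL (c :: rest)).tail.map List.reverse).reverse,
       (pvSplitL (c :: rest)).headI.reverse, some c) := by
  induction rest generalizing c with
  | nil => simp [pvStepB, pvSplitL]
  | cons p tl ih =>
    have hrev : (c :: p :: tl).reverse = (p :: tl).reverse ++ [c] := by simp
    rw [hrev, List.foldl_append, ih p, List.foldl_cons, List.foldl_nil]
    obtain ⟨s, ss, hS⟩ : ∃ s ss, pvSplitL (p :: tl) = s :: ss := by
      cases h : pvSplitL (p :: tl) with
      | nil => exact absurd h (pvSplitL_ne_nil p tl)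
      | cons s ss => exact ⟨s, ss, rfl⟩
    by_cases hcond : (PySem.Chars.islower c && PySem.Chars.isupper p) = true
    · rw [pvSplitL_pos c p tl hcond, hS]
      simp [pvStepB, hcond]
    · rw [pvSplitL_neg c p tl s ss hcond hS, hS]
      simp [pvStepB, hcond]

-- A equals the canonical split
theorem pvA_eq (text : String) :
    iter_split_lower_to_upper_case_py text = (pvSplitL text.toList).map String.ofList := by
  unfold iter_split_lower_to_upper_case_py
  show (let cs := text.toList
        let res := (PySem.List.enumerate cs 0).foldl (pvStepA cs) ((0 : Int), ([] : List String))
        if res.1 < (cs.length : Int) then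
          res.2 ++ [String.ofList (PySem.List.slice cs (some res.1) none)]
        else res.2) = (pvSplitL text.toList).map String.ofList
  simp only []
  generalize text.toList = cs
  rw [show (0 : Int) = ((0 : Nat) : Int) by norm_num,
    pvLemA cs cs 0 (by simp) _ []]
  cases cs with
  | nil =>
    have hb : pvBnds ([] : List Char) 0 = [] := by
      unfold pvBnds
      rw [PySem.List.pyRange_one_eq_nil (by norm_num), List.filter_nil]
    simp [hb, pvEmit, pvLast, pvSplitL]
  | cons c rest =>
    have hn : (0 : Nat) < (c :: rest).length := by simp
    have hlast : pvLast ((0 : Nat) : Int) (pvBnds (c :: rest) 0) < ((c :: rest).length : Int) := by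
      rcases pvLast_mem_or_eq ((0 : Nat) : Int) (pvBnds (c :: rest) 0) with h | h
      · rw [h]; exact_mod_cast hn
      · exact (PySem.List.mem_pyRange_one.mp (List.mem_of_mem_filter h)).2
    rw [if_pos hlast, List.nil_append, ← pvEmitC_eq, pvBnds_zero,
      show pvBnds2 (c :: rest) 1 = pvBnds2 (c :: rest) (0 + 1) from rfl,
      pvMain (c :: rest) (c :: rest) 0 (by simp) hn]

-- B equals the canonical split
theorem pvB_eq (text : String) :
    iter_split_lower_to_upper_case_py_alt text = (pvSplitL text.toList).map String.ofList := by
  unfold iter_split_lower_to_upper_case_py_alt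
  show (let cs := text.toList
        let st := cs.reverse.foldl pvStepB ([], [], none)
        let segments := if st.2.1 ≠ [] then st.1 ++ [st.2.1] else st.1
        segments.reverse.map (fun s => String.ofList s.reverse)) =
       (pvSplitL text.toList).map String.ofList
  simp only []
  generalize text.toList = cs
  cases cs with
  | nil => simp [pvSplitL]
  | cons c rest =>
    rw [pvFoldB c rest]
    obtain ⟨s, ss, hS⟩ : ∃ s ss, pvSplitL (c :: rest) = s :: ss := by
      cases h : pvSplitL (c :: rest) with
      | nil => exact absurd h (pvSplitL_ne_nil c rest)
      | cons s ss => exact ⟨s, ss, rfl⟩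
    have hs : s ≠ [] := by
      have := pvSplitL_headI_ne_nil c rest
      rw [hS] at this; exact this
    rw [hS]
    simp only [List.headI, List.tail]
    rw [if_pos (by simp [hs])]
    simp [List.map_map, Function.comp_def]

-- ===== VERDICT (by name: the statement is the Claim_ definition above) =====
theorem iter_split_lower_to_upper_case_py_spec : Claim_equal_iter_split_lower_to_upper_case_py := by
  unfold Claim_equal_iter_split_lower_to_upper_case_py
  intro text _
  unfold Spec_iter_split_lower_to_upper_case_py
  rw [pvA_eq, pvB_eq]
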